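-- pv_equiv track=rewrite | github.com/ShaikMohammedNaveed/validation_and_delivery | delivery_workflow/parsers/src/apex_parser.py | extract_metadata_for_apex
-- ===== SOURCE A (Python) =====
-- def extract_metadata_for_apex(lines):
--     """
--     Extract metadata from the notebook's first cell, including 'File Name' and 'Number of Issues'.
--     """
--     if not isinstance(lines, list):
--         raise TypeError("Expected a list of lines for metadata extraction.")
--     if not lines:
--         return {"class_name": "", "number_of_issues": "0"}  # Ensure both fields exist
--
--     metadata = {"class_name": "", "number_of_issues": "0"}  # Initialize
--
--     for line in lines:
--         line_cleaned = line.strip()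
--         if line_cleaned.startswith("**File Name**"):
--             metadata["class_name"] = line_cleaned.split("-", 1)[-1].strip()
--         elif line_cleaned.startswith("File Name"):
--             metadata["class_name"] = line_cleaned.split("-", 1)[-1].strip()
--         elif line_cleaned.startswith("**Number of Issues**"):
--             metadata["number_of_issues"] = line_cleaned.split("-", 1)[-1].strip()  # Capture issue count
--         elif line_cleaned.startswith("Number of Issues"):
--             metadata["number_of_issues"] = line_cleaned.split("-", 1)[-1].strip()  # Capture issue count
--
--     return metadata
-- ===== SOURCE B (Python) =====
-- def extract_metadata_for_apex(lines):
--     """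
--     Extract metadata from the notebook's first cell, including 'File Name' and 'Number of Issues'.
--     """
--     if not isinstance(lines, list):
--         raise TypeError("Expected a list of lines for metadata extraction.")
--
--     def last_value(prefixes, default):
--         # last matching line wins, so the first match scanning backwards is the answer
--         for line in reversed(lines):
--             cleaned = line.strip()
--             if cleaned.startswith(prefixes):
--                 return cleaned.split("-", 1)[-1].strip()
--         return default
--
--     return {
--         "class_name": last_value(("**File Name**", "File Name"), ""),
--         "number_of_issues": last_value(("**Number of Issues**", "Number of Issues"), "0"),
--     }
-- ===== Notes on version B (the rewrite author's own statement) =====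
-- stated objective: alternative
-- what changed: Replaces the forward fold over a mutable dict (four-way if/elif, last write wins) with two independent backward searches over reversed(lines) that each return the first match per field, then builds the result dict in one expression; correct because the two fields' prefix sets are disjoint.
import Mathlib
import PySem

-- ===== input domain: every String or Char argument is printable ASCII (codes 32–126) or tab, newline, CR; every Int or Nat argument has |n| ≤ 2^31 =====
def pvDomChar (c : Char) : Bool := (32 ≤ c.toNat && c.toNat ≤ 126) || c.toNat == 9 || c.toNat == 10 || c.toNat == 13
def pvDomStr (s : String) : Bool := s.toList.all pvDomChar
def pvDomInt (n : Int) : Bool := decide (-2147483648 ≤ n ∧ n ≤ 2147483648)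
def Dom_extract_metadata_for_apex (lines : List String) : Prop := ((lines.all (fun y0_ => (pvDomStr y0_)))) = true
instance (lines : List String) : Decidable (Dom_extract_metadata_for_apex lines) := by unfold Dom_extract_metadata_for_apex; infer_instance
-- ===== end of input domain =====

-- B replaces A's forward fold over a mutable dict with two independent backward searches
-- (first match over reversed(lines) per field); alternative decomposition, same cost.
-- The isinstance TypeError cannot occur under the typed signature (lines is always a list).

-- ===== PORT A =====
-- value taken for a matched line: line_cleaned.split("-", 1)[-1].strip()
def pvSplitVal (c : String) : String :=
  PySem.Str.strip (PySem.List.pyGetD ((PySem.Str.splitMax? c "-" 1).getD []) (-1) "")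

-- A's per-line if/elif chain updating the metadata dict
def pvStepA (metadata : PySem.Dict String String) (line : String) : PySem.Dict String String :=
  let c := PySem.Str.strip line
  if PySem.Str.startswith c "**File Name**" then metadata.insert "class_name" (pvSplitVal c)
  else if PySem.Str.startswith c "File Name" then metadata.insert "class_name" (pvSplitVal c)
  else if PySem.Str.startswith c "**Number of Issues**" then metadata.insert "number_of_issues" (pvSplitVal c)
  else if PySem.Str.startswith c "Number of Issues" then metadata.insert "number_of_issues" (pvSplitVal c)
  else metadata

def extract_metadata_for_apex (lines : List String) : List (String × String) :=
  if lines = [] then (PySem.Dict.ofList [("class_name", ""), ("number_of_issues", "0")]).items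
  else (lines.foldl pvStepA (PySem.Dict.ofList [("class_name", ""), ("number_of_issues", "0")])).items

-- ===== PORT B =====
-- cleaned.startswith(("**File Name**", "File Name"))
def pvMatchFN (c : String) : Bool :=
  PySem.Str.startswith c "**File Name**" || PySem.Str.startswith c "File Name"

-- cleaned.startswith(("**Number of Issues**", "Number of Issues"))
def pvMatchNI (c : String) : Bool :=
  PySem.Str.startswith c "**Number of Issues**" || PySem.Str.startswith c "Number of Issues"

-- B's helper last_value: first match scanning the (already reversed) list, else the default
def pvLastValue (p : String → Bool) (dflt : String) : List String → String
  | [] => dflt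
  | l :: rest =>
    let c := PySem.Str.strip l
    if p c then pvSplitVal c else pvLastValue p dflt rest

def extract_metadata_for_apex_alt (lines : List String) : List (String × String) :=
  [("class_name", pvLastValue pvMatchFN "" lines.reverse),
   ("number_of_issues", pvLastValue pvMatchNI "0" lines.reverse)]

-- ===== PRECONDITION & SPEC =====
def Spec_extract_metadata_for_apex (lines : List String) (out : List (String × String)) : Prop := out = extract_metadata_for_apex_alt lines
instance (lines : List String) (out : List (String × String)) : Decidable (Spec_extract_metadata_for_apex lines out) := by unfold Spec_extract_metadata_for_apex; infer_instance

-- ===== CLAIM (what is proved, stated in full; the proofs are below) =====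
def Claim_equal_extract_metadata_for_apex : Prop := ∀ (lines : List String), Dom_extract_metadata_for_apex lines → Spec_extract_metadata_for_apex lines (extract_metadata_for_apex lines)

-- ===== LEMMAS AND PROOFS =====

-- two string literals neither of which is a prefix of the other cannot both be prefixes of c
theorem pv_prefix_disjoint {c p q : String}
    (hpq : ¬ p.toList <+: q.toList) (hqp : ¬ q.toList <+: p.toList)
    (hp : PySem.Str.startswith c p = true) : PySem.Str.startswith c q = false := by
  by_contra h
  rw [Bool.not_eq_false] at h
  rw [PySem.Str.startswith_eq, PySem.Chars.startswith_iff] at hp h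
  rcases List.prefix_or_prefix_of_prefix hp h with h1 | h1
  · exact hpq h1
  · exact hqp h1

theorem pvFN_not_NI {c : String} (h : pvMatchFN c = true) : pvMatchNI c = false := by
  simp only [pvMatchFN, Bool.or_eq_true] at h
  simp only [pvMatchNI, Bool.or_eq_false_iff]
  rcases h with h | h
  · exact ⟨pv_prefix_disjoint (by decide) (by decide) h, pv_prefix_disjoint (by decide) (by decide) h⟩
  · exact ⟨pv_prefix_disjoint (by decide) (by decide) h, pv_prefix_disjoint (by decide) (by decide) h⟩

-- appending a line at the end of the reversed-scan list only changes the fallback default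
theorem pvLastValue_append (p : String → Bool) (dflt : String) (l : List String) (x : String) :
    pvLastValue p dflt (l ++ [x])
      = pvLastValue p (if p (PySem.Str.strip x) then pvSplitVal (PySem.Str.strip x) else dflt) l := by
  induction l with
  | nil => simp [pvLastValue]
  | cons y ys ih => simp only [List.cons_append, pvLastValue, ih]

-- the loop invariant: after folding A's step, the items are exactly B's two searches
theorem pvStepA_mk (a b line : String) :
    pvStepA (PySem.Dict.mk [("class_name", a), ("number_of_issues", b)]) line
      = PySem.Dict.mk
          [("class_name", if pvMatchFN (PySem.Str.strip line) then pvSplitVal (PySem.Str.strip line) else a),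
           ("number_of_issues", if pvMatchNI (PySem.Str.strip line) then pvSplitVal (PySem.Str.strip line) else b)] := by
  simp only [pvStepA, pvMatchFN, pvMatchNI]
  by_cases h1 : PySem.Str.startswith (PySem.Str.strip line) "**File Name**" = true
  · have hNI := pvFN_not_NI (c := PySem.Str.strip line) (by simp only [pvMatchFN, h1, Bool.true_or])
    simp only [pvMatchNI, Bool.or_eq_false_iff] at hNI
    simp only [h1, hNI.1, hNI.2, Bool.true_or, Bool.or_self, Bool.false_eq_true, if_true, if_false]
    rfl
  · rw [Bool.not_eq_true] at h1
    by_cases h2 : PySem.Str.startswith (PySem.Str.strip line) "File Name" = true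
    · have hNI := pvFN_not_NI (c := PySem.Str.strip line) (by simp only [pvMatchFN, h2, Bool.or_true])
      simp only [pvMatchNI, Bool.or_eq_false_iff] at hNI
      simp only [h1, h2, hNI.1, hNI.2, Bool.false_or, Bool.or_self, Bool.false_eq_true, if_true, if_false]
      rfl
    · rw [Bool.not_eq_true] at h2
      by_cases h3 : PySem.Str.startswith (PySem.Str.strip line) "**Number of Issues**" = true
      · simp only [h1, h2, h3, Bool.true_or, Bool.or_self, Bool.false_eq_true, if_true, if_false]
        rfl
      · rw [Bool.not_eq_true] at h3
        by_cases h4 : PySem.Str.startswith (PySem.Str.strip line) "Number of Issues" = true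
        · simp only [h1, h2, h3, h4, Bool.false_or, Bool.or_self, Bool.false_eq_true, if_true, if_false]
          rfl
        · rw [Bool.not_eq_true] at h4
          simp only [h1, h2, h3, h4, Bool.or_self, Bool.false_eq_true, if_false]

-- the loop invariant: after folding A's step, the items are exactly B's two searches
theorem pv_invariant (lines : List String) (a b : String) :
    (lines.foldl pvStepA (PySem.Dict.mk [("class_name", a), ("number_of_issues", b)])).items
      = [("class_name", pvLastValue pvMatchFN a lines.reverse),
         ("number_of_issues", pvLastValue pvMatchNI b lines.reverse)] := by
  induction lines generalizing a b with
  | nil => simp [pvLastValue]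
  | cons x xs ih =>
    simp only [List.foldl_cons, List.reverse_cons, pvLastValue_append, pvStepA_mk, ih]

-- ===== VERDICT (by name: the statement is the Claim_ definition above) =====
theorem extract_metadata_for_apex_spec : Claim_equal_extract_metadata_for_apex := by
  intro lines _
  unfold Spec_extract_metadata_for_apex extract_metadata_for_apex extract_metadata_for_apex_alt
  have hof : PySem.Dict.ofList [("class_name", ""), ("number_of_issues", "0")]
      = PySem.Dict.mk [("class_name", ""), ("number_of_issues", "0")] := by rfl
  split
  · next he => subst he; rfl
  · rw [hof, pv_invariant]
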